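-- pv_equiv track=rewrite | github.com/iamnortey/ninobyte | products/context-cleaner/src/ninobyte_context_cleaner/lexicon_map.py | build_match_set
-- ===== SOURCE A (Python) =====
-- def build_match_set(
--     entries: list[dict[str, str]],
--     case_fold: bool = True
-- ) -> tuple[set[str], dict[str, str]]:
--     """
--     Build a match set from entries.
--
--     Args:
--         entries: List of entry dictionaries (must have 'term' key)
--         case_fold: Whether to use case-insensitive matching
--
--     Returns:
--         (match_set, original_terms) where:
--         - match_set: Set of terms for matching (possibly casefolded)
--         - original_terms: Dict mapping casefolded → original term
--     """
--     match_set = set()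
--     original_terms = {}
--
--     for entry in entries:
--         term = entry.get("term", "").strip()
--         if not term:
--             continue
--
--         if case_fold:
--             folded = term.casefold()
--             match_set.add(folded)
--             # Keep first occurrence if duplicates
--             if folded not in original_terms:
--                 original_terms[folded] = term
--         else:
--             match_set.add(term)
--             original_terms[term] = term
--
--     return match_set, original_terms
-- ===== SOURCE B (Python) =====
-- def build_match_set(entries, case_fold=True):
--     # Staged pipeline: extract all non-empty stripped terms, dedupe their keys
--     # in first-occurrence order, then pair each unique key with the first term
--     # that produces it. No incremental set/dict maintenance inside the scan.
--     def key(t):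
--         return t.casefold() if case_fold else t
--     terms = [t for t in (e.get("term", "").strip() for e in entries) if t]
--     uniq = list(dict.fromkeys(key(t) for t in terms))
--     original_terms = {k: next(t for t in terms if key(t) == k) for k in uniq}
--     return set(original_terms), original_terms
-- ===== Notes on version B (the rewrite author's own statement) =====
-- stated objective: alternative
-- what changed: B replaces A's single pass that incrementally maintains a set and a first-wins dict with a staged pipeline: extract the stripped non-empty terms, dedupe their keys via dict.fromkeys, then build the dict by searching for the first term matching each unique key (inner scan instead of maintained state).
import Mathlib
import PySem

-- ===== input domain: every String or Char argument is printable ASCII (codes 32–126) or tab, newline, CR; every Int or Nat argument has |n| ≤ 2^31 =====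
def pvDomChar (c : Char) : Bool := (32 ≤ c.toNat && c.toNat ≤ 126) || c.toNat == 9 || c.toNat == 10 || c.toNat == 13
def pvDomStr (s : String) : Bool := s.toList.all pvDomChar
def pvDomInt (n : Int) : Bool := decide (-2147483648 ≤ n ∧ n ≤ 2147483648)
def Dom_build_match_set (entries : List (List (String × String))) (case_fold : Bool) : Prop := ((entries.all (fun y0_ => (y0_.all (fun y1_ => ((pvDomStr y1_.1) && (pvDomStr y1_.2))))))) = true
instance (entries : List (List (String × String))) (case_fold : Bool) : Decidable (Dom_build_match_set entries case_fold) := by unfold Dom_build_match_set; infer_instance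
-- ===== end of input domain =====

-- B rebuilds the same result as a staged pipeline (extract terms, dedupe keys, search the
-- first matching term per key) instead of A's single pass maintaining a set and a dict.
-- str.casefold is ported as PySem.Str.lower, exact on the ASCII domain above.

-- ===== PORT A =====
-- loop body of A: updates the pair (match_set, original_terms) for one entry
def pvStepA (case_fold : Bool) (st : PySem.Set String × PySem.Dict String String)
    (entry : List (String × String)) : PySem.Set String × PySem.Dict String String :=
  let term := PySem.Str.strip ((PySem.Dict.mk entry).getD "term" "")
  if term = "" then st
  else if case_fold then
    let folded := PySem.Str.lower term
    let ms := PySem.Set.add st.1 folded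
    let ot := if st.2.contains folded then st.2 else st.2.insert folded term
    (ms, ot)
  else
    (PySem.Set.add st.1 term, st.2.insert term term)

def build_match_set (entries : List (List (String × String))) (case_fold : Bool) :
    List String × (List (String × String)) :=
  let st := entries.foldl (pvStepA case_fold) (PySem.Set.empty, PySem.Dict.empty)
  (st.1, st.2.items)

-- ===== PORT B =====
-- Python's local `key(t)`
def pvKey (case_fold : Bool) (t : String) : String :=
  if case_fold then PySem.Str.lower t else t

def build_match_set_alt (entries : List (List (String × String))) (case_fold : Bool) :
    List String × (List (String × String)) :=
  let terms := (entries.map (fun e => PySem.Str.strip ((PySem.Dict.mk e).getD "term" ""))).filter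
      (fun t => !(t == ""))
  let uniq := PySem.List.dedup (terms.map (pvKey case_fold))
  -- dict comprehension over uniq; next(...) is find? (some for every k ∈ uniq, so getD "" is never the default)
  let ot := uniq.foldl
      (fun d k => d.insert k ((terms.find? (fun t => pvKey case_fold t == k)).getD "")) PySem.Dict.empty
  (PySem.Set.ofList ot.keys, ot.items)

-- ===== PRECONDITION & SPEC =====
def Spec_build_match_set (entries : List (List (String × String))) (case_fold : Bool) (out : List String × (List (String × String))) : Prop := out = build_match_set_alt entries case_fold
instance (entries : List (List (String × String))) (case_fold : Bool) (out : List String × (List (String × String))) : Decidable (Spec_build_match_set entries case_fold out) := by unfold Spec_build_match_set; infer_instance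

-- ===== CLAIM (what is proved, stated in full; the proofs are below) =====
def Claim_equal_build_match_set : Prop := ∀ (entries : List (List (String × String))) (case_fold : Bool), Dom_build_match_set entries case_fold → Spec_build_match_set entries case_fold (build_match_set entries case_fold)

-- ===== LEMMAS AND PROOFS =====

-- proof-only abbreviations: the stripped non-empty terms, and the dict-comprehension value
def pvTerms (entries : List (List (String × String))) : List String :=
  (entries.map (fun e => PySem.Str.strip ((PySem.Dict.mk e).getD "term" ""))).filter
    (fun t => !(t == ""))

def pvVal (case_fold : Bool) (terms : List String) (k : String) : String :=
  (terms.find? (fun t => pvKey case_fold t == k)).getD ""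

lemma pv_terms_append (es : List (List (String × String))) (e : List (String × String)) :
    pvTerms (es ++ [e]) = pvTerms es ++
      (if PySem.Str.strip ((PySem.Dict.mk e).getD "term" "") = "" then []
       else [PySem.Str.strip ((PySem.Dict.mk e).getD "term" "")]) := by
  unfold pvTerms
  rw [List.map_append, List.filter_append]
  by_cases h : PySem.Str.strip ((PySem.Dict.mk e).getD "term" "") = "" <;> simp [h]

-- appending a term does not change the first matching term of an already-present key
lemma pv_val_append_of_mem (cf : Bool) (terms : List String) (t k : String)
    (hk : k ∈ terms.map (pvKey cf)) :
    pvVal cf (terms ++ [t]) k = pvVal cf terms k := by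
  unfold pvVal
  rw [List.find?_append]
  obtain ⟨t', ht', hket⟩ := List.mem_map.mp hk
  have : (terms.find? (fun t => pvKey cf t == k)).isSome := by
    rw [List.find?_isSome]
    exact ⟨t', ht', by simp [hket]⟩
  obtain ⟨v, hv⟩ := Option.isSome_iff_exists.mp this
  simp [hv]

lemma pv_val_append_new (cf : Bool) (terms : List String) (t k : String)
    (hk : k ∉ terms.map (pvKey cf)) (hket : pvKey cf t = k) :
    pvVal cf (terms ++ [t]) k = t := by
  unfold pvVal
  rw [List.find?_append]
  have hnone : terms.find? (fun t => pvKey cf t == k) = none := by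
    rw [List.find?_eq_none]
    intro x hx
    simp only [beq_iff_eq]
    exact fun h => hk (List.mem_map.mpr ⟨x, hx, h⟩)
  simp [hnone, hket]

-- Set.add of a present / absent element
lemma pv_set_add_mem (s : PySem.Set String) (x : String) (h : x ∈ s) :
    PySem.Set.add s x = s := by
  simp [PySem.Set.add, PySem.Set.contains, h]

lemma pv_set_add_not_mem (s : PySem.Set String) (x : String) (h : x ∉ s) :
    PySem.Set.add s x = s ++ [x] := by
  simp only [PySem.Set.add, PySem.Set.contains]
  rw [if_neg (by simpa using h)]

-- with case_fold=False the first term matching key k is k itself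
lemma pv_val_self (terms : List String) (k : String) (hk : k ∈ terms.map (pvKey false)) :
    pvVal false terms k = k := by
  unfold pvVal
  obtain ⟨t', ht', hket⟩ := List.mem_map.mp hk
  have hsome : ∃ v, terms.find? (fun x => pvKey false x == k) = some v := by
    rw [← Option.isSome_iff_exists, List.find?_isSome]
    exact ⟨t', ht', by simp [hket]⟩
  obtain ⟨v, hv⟩ := hsome
  have hvk : v = k := by simpa [pvKey] using List.find?_some hv
  simp [hv, hvk]

-- A's loop state, characterised against B's staged computation (back induction on entries)
lemma pv_A_loop (cf : Bool) (entries : List (List (String × String))) :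
    (entries.foldl (pvStepA cf) (PySem.Set.empty, PySem.Dict.empty)).1
        = PySem.Set.ofList ((pvTerms entries).map (pvKey cf)) ∧
      (entries.foldl (pvStepA cf) (PySem.Set.empty, PySem.Dict.empty)).2.items
        = (PySem.List.dedup ((pvTerms entries).map (pvKey cf))).map
            (fun k => (k, pvVal cf (pvTerms entries) k)) := by
  induction entries using List.reverseRecOn with
  | nil =>
    simp [pvTerms, PySem.Set.empty, PySem.Dict.empty, PySem.List.dedup, PySem.Set.ofList]
  | append_singleton es e ih =>
    obtain ⟨ih1, ih2⟩ := ih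
    rw [List.foldl_append, List.foldl_cons, List.foldl_nil, pv_terms_append]
    set st := es.foldl (pvStepA cf) (PySem.Set.empty, PySem.Dict.empty) with hst
    set t := PySem.Str.strip ((PySem.Dict.mk e).getD "term" "") with ht
    by_cases h0 : t = ""
    · simpa [pvStepA, ← ht, h0] using ⟨ih1, ih2⟩
    · simp only [h0, if_false]
      set terms := pvTerms es with hterms
      set keys := terms.map (pvKey cf) with hkeys
      set k := pvKey cf t with hk
      have hkeys' : (terms ++ [t]).map (pvKey cf) = keys ++ [k] := by
        simp [hkeys, hk]
      have hDkeys : st.2.keys = PySem.List.dedup keys := by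
        show st.2.items.map Prod.fst = _
        rw [ih2, List.map_map]
        simp [Function.comp_def]
      have hcont : st.2.contains k = decide (k ∈ keys) := by
        rw [PySem.Dict.contains_eq_decide_mem_keys, hDkeys]
        simp
      -- old entries keep their values
      have hmapold : (PySem.List.dedup keys).map (fun k' => (k', pvVal cf (terms ++ [t]) k'))
          = (PySem.List.dedup keys).map (fun k' => (k', pvVal cf terms k')) := by
        apply List.map_congr_left
        intro k' hk'
        have : k' ∈ keys := by
          rwa [PySem.List.dedup_eq_ofList, PySem.Set.mem_ofList _ _] at hk'
        rw [pv_val_append_of_mem cf terms t k' this]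
      by_cases hmem : k ∈ keys
      · -- key already present: set and dedup unchanged
        have hofl : PySem.Set.ofList (keys ++ [k]) = PySem.Set.ofList keys := by
          rw [PySem.Set.ofList_append_singleton, pv_set_add_mem]
          exact (PySem.Set.mem_ofList _ _).mpr hmem
        have hded : PySem.List.dedup (keys ++ [k]) = PySem.List.dedup keys := by
          simp only [PySem.List.dedup_eq_ofList]; exact hofl
        have hsetside : PySem.Set.add st.1 k = PySem.Set.ofList (keys ++ [k]) := by
          rw [ih1, hofl, pv_set_add_mem]
          exact (PySem.Set.mem_ofList _ _).mpr hmem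
        have hcont' : st.2.contains k = true := by rw [hcont]; simpa using hmem
        have hlow : cf = true → PySem.Str.lower t = k := fun hcf => by simp [hk, pvKey, hcf]
        cases cf with
        | true =>
          refine ⟨?_, ?_⟩
          · simp only [pvStepA, ← ht, h0, if_false, if_true]
            rw [hlow rfl, hkeys', hsetside]
          · simp only [pvStepA, ← ht, h0, if_false, if_true, hlow rfl, hcont']
            rw [hkeys', hded, hmapold, ih2]
        | false =>
          -- overwrite with (t, t): the stored value for key t is already t
          have hkt : k = t := by simp [hk, pvKey]
          rw [hkt] at hsetside hcont' hkeys' hded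
          refine ⟨?_, ?_⟩
          · simp only [pvStepA, ← ht, h0, if_false, Bool.false_eq_true]
            rw [hkeys']; exact hsetside
          · simp only [pvStepA, ← ht, h0, if_false, Bool.false_eq_true]
            rw [hkeys', hded, hmapold,
              PySem.Dict.items_insert_of_contains _ _ hcont', ih2, List.map_map]
            apply List.map_congr_left
            intro k' hk'
            by_cases hkk : k' = t
            · have hvk : pvVal false terms k' = k' := pv_val_self terms k' (by
                have h1 : k' ∈ keys := by
                  rwa [PySem.List.dedup_eq_ofList, PySem.Set.mem_ofList _ _] at hk'
                rwa [hkeys] at h1)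
              simp [hkk, hkk ▸ hvk]
            · simp [Function.comp, hkk]
      · -- fresh key: both set and dict grow by k
        have hofl : PySem.Set.ofList (keys ++ [k]) = PySem.Set.ofList keys ++ [k] := by
          rw [PySem.Set.ofList_append_singleton, pv_set_add_not_mem]
          exact fun h => hmem ((PySem.Set.mem_ofList _ _).mp h)
        have hded : PySem.List.dedup (keys ++ [k]) = PySem.List.dedup keys ++ [k] := by
          simp only [PySem.List.dedup_eq_ofList]; exact hofl
        have hsetside : PySem.Set.add st.1 k = PySem.Set.ofList (keys ++ [k]) := by
          rw [ih1, hofl, pv_set_add_not_mem]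
          exact fun h => hmem ((PySem.Set.mem_ofList _ _).mp h)
        have hcont' : st.2.contains k = false := by rw [hcont]; simpa using hmem
        have hitems : (st.2.insert k t).items
            = (PySem.List.dedup (keys ++ [k])).map (fun k' => (k', pvVal cf (terms ++ [t]) k')) := by
          rw [PySem.Dict.items_insert_of_not_contains _ _ hcont', ih2, hded,
            List.map_append, hmapold]
          simp [pv_val_append_new cf terms t k hmem hk.symm]
        have hlow : cf = true → PySem.Str.lower t = k := fun hcf => by simp [hk, pvKey, hcf]
        cases cf with
        | true =>
          refine ⟨?_, ?_⟩
          · simp only [pvStepA, ← ht, h0, if_false, if_true]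
            rw [hlow rfl, hkeys', hsetside]
          · simp only [pvStepA, ← ht, h0, if_false, if_true, hlow rfl, hcont', Bool.false_eq_true]
            rw [hkeys', hitems]
        | false =>
          have hkt : k = t := by simp [hk, pvKey]
          rw [hkt] at hsetside hkeys' hitems
          refine ⟨?_, ?_⟩
          · simp only [pvStepA, ← ht, h0, if_false, Bool.false_eq_true]
            rw [hkeys']; exact hsetside
          · simp only [pvStepA, ← ht, h0, if_false, Bool.false_eq_true]
            rw [hkeys']; exact hitems

-- ===== VERDICT (by name: the statement is the Claim_ definition above) =====
theorem build_match_set_spec : Claim_equal_build_match_set := by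
  intro entries cf _
  unfold Spec_build_match_set build_match_set build_match_set_alt
  obtain ⟨h1, h2⟩ := pv_A_loop cf entries
  have hterms : ((entries.map (fun e => PySem.Str.strip ((PySem.Dict.mk e).getD "term" ""))).filter
      (fun t => !(t == ""))) = pvTerms entries := rfl
  set terms := pvTerms entries with hT
  set keys := terms.map (pvKey cf) with hK
  set uniq := PySem.List.dedup keys with hU
  have hnodup : uniq.Nodup := by
    rw [hU, PySem.List.dedup_eq_ofList]; exact PySem.Set.nodup_ofList _
  -- B's dict: fresh distinct keys appended to the empty dict
  have hitemsB : (uniq.foldl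
      (fun d k => d.insert k ((terms.find? (fun t => pvKey cf t == k)).getD ""))
      (PySem.Dict.empty : PySem.Dict String String)).items
      = uniq.map (fun k => (k, (terms.find? (fun t => pvKey cf t == k)).getD "")) := by
    have hfresh := PySem.Dict.items_foldl_insert_fresh
      (d := (PySem.Dict.empty : PySem.Dict String String)) (l := uniq)
      (k := fun x => x)
      (v := fun x => (terms.find? (fun t => pvKey cf t == x)).getD "")
      (by intro a _; simp) (by simpa using hnodup)
    simpa [PySem.Dict.empty] using hfresh
  have hkeysB : (uniq.foldl
      (fun d k => d.insert k ((terms.find? (fun t => pvKey cf t == k)).getD ""))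
      (PySem.Dict.empty : PySem.Dict String String)).keys = uniq := by
    simp only [PySem.Dict.keys, hitemsB, List.map_map]
    simp [Function.comp_def]
  simp only [hterms, ← hT, ← hK, ← hU, hkeysB, hitemsB]
  refine Prod.ext ?_ ?_
  · show (entries.foldl (pvStepA cf) (PySem.Set.empty, PySem.Dict.empty)).1
      = PySem.Set.ofList uniq
    rw [h1, hU, PySem.List.dedup_eq_ofList, PySem.Set.ofList_ofList]
  · show (entries.foldl (pvStepA cf) (PySem.Set.empty, PySem.Dict.empty)).2.items
      = uniq.map (fun k => (k, (terms.find? (fun t => pvKey cf t == k)).getD ""))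
    rw [h2]
    rfl
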